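-- pv_equiv track=rewrite | github.com/vuminhph/randomCodes | target_vicinity.py | getTV
-- ===== SOURCE A (Python) =====
-- def getTV(actual, guess):
--     actual_dict = {}
--     for i in range(len(actual)):
--         if actual_dict.get(actual[i]) is None:
--             actual_dict[actual[i]] = [i]
--         else:
--             actual_dict[actual[i]].append(i)
--
--     targets = 0
--     vicinities = 0
--
--     for i in range(len(guess)):
--         if actual_dict.get(guess[i]) is None:
--             continue
--         for loc in actual_dict[guess[i]]:
--             if i == loc:
--                 targets += 1
--             if i == loc - 1 or i == loc + 1:
--                 vicinities += 1
--
--     return str(targets) + 'T' + str(vicinities) + 'V'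
--     return f'{targets}T{vicinities}V'
-- ===== SOURCE B (Python) =====
-- def getTV(actual, guess):
--     n = len(actual)
--     targets = 0
--     vicinities = 0
--     for i, g in enumerate(guess):
--         if i < n and actual[i] == g:
--             targets += 1
--         if 0 <= i - 1 and i - 1 < n and actual[i - 1] == g:
--             vicinities += 1
--         if i + 1 < n and actual[i + 1] == g:
--             vicinities += 1
--     return str(targets) + 'T' + str(vicinities) + 'V'
-- ===== Notes on version B (the rewrite author's own statement) =====
-- stated objective: faster
-- what changed: Replaced the value->positions dict build plus a per-guess inner scan over the stored position lists with a single direct pass that compares guess[i] against actual[i-1], actual[i], actual[i+1] with bounds checks, maintaining only two counters.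
import Mathlib
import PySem

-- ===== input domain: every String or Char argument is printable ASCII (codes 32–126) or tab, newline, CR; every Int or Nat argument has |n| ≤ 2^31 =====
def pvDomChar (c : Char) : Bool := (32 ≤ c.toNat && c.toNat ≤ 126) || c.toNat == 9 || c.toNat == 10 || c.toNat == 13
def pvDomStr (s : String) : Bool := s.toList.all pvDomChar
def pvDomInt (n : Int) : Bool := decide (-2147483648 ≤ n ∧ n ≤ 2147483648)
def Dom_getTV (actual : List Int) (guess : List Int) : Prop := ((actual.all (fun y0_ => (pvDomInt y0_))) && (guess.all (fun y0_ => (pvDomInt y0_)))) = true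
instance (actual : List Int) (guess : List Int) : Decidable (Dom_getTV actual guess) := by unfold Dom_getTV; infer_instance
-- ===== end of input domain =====

-- B replaces A's value->positions dict build plus inner scans over position lists by one
-- direct pass comparing guess[i] with actual[i-1], actual[i], actual[i+1]; objective: simpler.

-- ===== PORT A =====
def getTV (actual : List Int) (guess : List Int) : String :=
  let d : PySem.Dict Int (List Int) :=
    (PySem.List.pyRange 0 (actual.length : Int) 1).foldl (fun d i =>
      let v := PySem.List.pyGetD actual i 0
      match d.get? v with
      | none => d.insert v [i]
      | some locs => d.insert v (locs ++ [i])) PySem.Dict.empty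
  let tv : Int × Int :=
    (PySem.List.pyRange 0 (guess.length : Int) 1).foldl (fun tv i =>
      let g := PySem.List.pyGetD guess i 0
      match d.get? g with
      | none => tv
      | some locs =>
        locs.foldl (fun tv loc =>
          (if i = loc then tv.1 + 1 else tv.1,
           if i = loc - 1 ∨ i = loc + 1 then tv.2 + 1 else tv.2)) tv) ((0 : Int), (0 : Int))
  PySem.Int.toStr tv.1 ++ "T" ++ PySem.Int.toStr tv.2 ++ "V"

-- ===== PORT B =====
def getTV_alt (actual : List Int) (guess : List Int) : String :=
  let n : Int := actual.length
  let tv : Int × Int :=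
    (PySem.List.enumerate guess 0).foldl (fun tv p =>
      let i := p.1
      let g := p.2
      let t := if i < n ∧ PySem.List.pyGetD actual i 0 = g then tv.1 + 1 else tv.1
      let v := if 0 ≤ i - 1 ∧ i - 1 < n ∧ PySem.List.pyGetD actual (i - 1) 0 = g then tv.2 + 1 else tv.2
      let v := if i + 1 < n ∧ PySem.List.pyGetD actual (i + 1) 0 = g then v + 1 else v
      (t, v)) ((0 : Int), (0 : Int))
  PySem.Int.toStr tv.1 ++ "T" ++ PySem.Int.toStr tv.2 ++ "V"

-- ===== PRECONDITION & SPEC =====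
def Spec_getTV (actual : List Int) (guess : List Int) (out : String) : Prop := out = getTV_alt actual guess
instance (actual : List Int) (guess : List Int) (out : String) : Decidable (Spec_getTV actual guess out) := by unfold Spec_getTV; infer_instance

-- ===== CLAIM (what is proved, stated in full; the proofs are below) =====
def Claim_equal_getTV : Prop := ∀ (actual : List Int) (guess : List Int), Dom_getTV actual guess → Spec_getTV actual guess (getTV actual guess)

-- ===== LEMMAS AND PROOFS =====

-- the positions of value g among the first m indices of `actual`, as A's dict stores them
def locsTo (actual : List Int) (m : Nat) (g : Int) : List Int :=
  (PySem.List.pyRange 0 (m : Int) 1).filter (fun j => decide (PySem.List.pyGetD actual j 0 = g))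

-- A's dict-building loop, restricted to the first m indices
def buildA (actual : List Int) (m : Nat) : PySem.Dict Int (List Int) :=
  (PySem.List.pyRange 0 (m : Int) 1).foldl (fun d i =>
    let v := PySem.List.pyGetD actual i 0
    match d.get? v with
    | none => d.insert v [i]
    | some locs => d.insert v (locs ++ [i])) PySem.Dict.empty

-- B's loop body as a named function (definitionally the body of getTV_alt's fold)
def stepB (actual : List Int) (tv : Int × Int) (i g : Int) : Int × Int :=
  let n : Int := actual.length
  let t := if i < n ∧ PySem.List.pyGetD actual i 0 = g then tv.1 + 1 else tv.1
  let v := if 0 ≤ i - 1 ∧ i - 1 < n ∧ PySem.List.pyGetD actual (i - 1) 0 = g then tv.2 + 1 else tv.2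
  let v := if i + 1 < n ∧ PySem.List.pyGetD actual (i + 1) 0 = g then v + 1 else v
  (t, v)

lemma dict_char (actual : List Int) (m : Nat) : ∀ g : Int,
    (buildA actual m).get? g =
      (if locsTo actual m g = [] then none else some (locsTo actual m g)) := by
  induction m with
  | zero =>
    intro g
    have h0 : PySem.List.pyRange 0 (0 : Int) 1 = [] := PySem.List.pyRange_one_eq_nil (le_refl 0)
    simp [buildA, locsTo, h0, PySem.Dict.get?_empty]
  | succ m ih =>
    intro g
    have hm0 : (0 : Int) ≤ (m : Int) := Int.natCast_nonneg m
    have hsplit : PySem.List.pyRange 0 ((m + 1 : Nat) : Int) 1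
        = PySem.List.pyRange 0 (m : Int) 1 ++ [(m : Int)] := by
      push_cast
      exact PySem.List.pyRange_one_succ_right hm0
    have hstep : buildA actual (m + 1) =
        (match (buildA actual m).get? (PySem.List.pyGetD actual (m : Int) 0) with
         | none => (buildA actual m).insert (PySem.List.pyGetD actual (m : Int) 0) [(m : Int)]
         | some locs => (buildA actual m).insert (PySem.List.pyGetD actual (m : Int) 0) (locs ++ [(m : Int)])) := by
      unfold buildA
      rw [hsplit, List.foldl_append]
      simp only [List.foldl_cons, List.foldl_nil]
    have hlocs : ∀ g' : Int, locsTo actual (m + 1) g' =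
        locsTo actual m g' ++ (if PySem.List.pyGetD actual (m : Int) 0 = g' then [(m : Int)] else []) := by
      intro g'
      unfold locsTo
      rw [hsplit, List.filter_append]
      simp only [List.filter_cons, List.filter_nil, decide_eq_true_eq, PySem.List.pyGetD_natCast]
    rw [hstep, hlocs g]
    by_cases hg : PySem.List.pyGetD actual (m : Int) 0 = g
    · rw [hg, if_pos rfl]
      cases h : (buildA actual m).get? g with
      | none =>
        have hempty : locsTo actual m g = [] := by
          by_cases he : locsTo actual m g = []
          · exact he
          · have hi := ih g
            rw [h, if_neg he] at hi
            exact absurd hi (by simp)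
        rw [PySem.Dict.get?_insert_self, hempty]
        simp
      | some locs =>
        have hi := ih g
        rw [h] at hi
        by_cases he : locsTo actual m g = []
        · rw [if_pos he] at hi; exact absurd hi (by simp)
        · rw [if_neg he] at hi
          have hlv : locs = locsTo actual m g := Option.some.inj hi
          rw [PySem.Dict.get?_insert_self, hlv]
          simp
    · rw [if_neg hg]
      cases h : (buildA actual m).get? (PySem.List.pyGetD actual (m : Int) 0) with
      | none =>
        rw [PySem.Dict.get?_insert_of_ne _ _ (fun hh => hg hh.symm), ih g]
        simp
      | some locs =>
        rw [PySem.Dict.get?_insert_of_ne _ _ (fun hh => hg hh.symm), ih g]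
        simp

lemma inner_fold (i : Int) (locs : List Int) : ∀ tv : Int × Int,
    locs.foldl (fun tv loc =>
      (if i = loc then tv.1 + 1 else tv.1,
       if i = loc - 1 ∨ i = loc + 1 then tv.2 + 1 else tv.2)) tv
    = (tv.1 + (locs.countP (fun loc => decide (loc = i)) : Int),
       tv.2 + (locs.countP (fun loc => decide (loc = i + 1)) : Int)
            + (locs.countP (fun loc => decide (loc = i - 1)) : Int)) := by
  induction locs with
  | nil => intro tv; simp
  | cons a l ih =>
    intro tv
    rw [List.foldl_cons, ih]
    simp only [List.countP_cons, decide_eq_true_eq]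
    rcases tv with ⟨t, w⟩
    dsimp only
    simp only [Prod.mk.injEq]
    constructor <;> split_ifs <;> push_cast <;> omega

lemma count_locs (actual : List Int) (g c : Int) :
    ((locsTo actual actual.length g).countP (fun loc => decide (loc = c)) : Int)
    = if 0 ≤ c ∧ c < (actual.length : Int) ∧ PySem.List.pyGetD actual c 0 = g then 1 else 0 := by
  have hnd : (locsTo actual actual.length g).Nodup :=
    List.Nodup.filter _ (PySem.List.nodup_pyRange_one 0 (actual.length : Int))
  have hcount : (locsTo actual actual.length g).countP (fun loc => decide (loc = c))
      = (locsTo actual actual.length g).count c := rfl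
  have hmem : c ∈ locsTo actual actual.length g ↔
      (0 ≤ c ∧ c < (actual.length : Int) ∧ PySem.List.pyGetD actual c 0 = g) := by
    simp [locsTo, List.mem_filter, PySem.List.mem_pyRange_one, and_assoc]
  rw [hcount]
  by_cases hc : c ∈ locsTo actual actual.length g
  · rw [List.count_eq_one_of_mem hnd hc, if_pos (hmem.mp hc)]
    simp
  · rw [List.count_eq_zero.mpr hc, if_neg (fun h => hc (hmem.mpr h))]
    simp

lemma foldl_range_enum {β : Type} (xs : List Int) (f : β → Int → Int → β) :
    ∀ (ys : List Int) (s : Nat) (init : β), xs.drop s = ys →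
      (PySem.List.pyRange (s : Int) (xs.length : Int) 1).foldl
          (fun acc i => f acc i (PySem.List.pyGetD xs i 0)) init
      = (PySem.List.enumerate ys (s : Int)).foldl (fun acc p => f acc p.1 p.2) init := by
  intro ys
  induction ys with
  | nil =>
    intro s init h
    have hs : xs.length ≤ s := by
      have hl := congrArg List.length h
      simp at hl
      omega
    rw [PySem.List.pyRange_one_eq_nil (by exact_mod_cast hs), PySem.List.enumerate_nil]
    rfl
  | cons y ys ih =>
    intro s init h
    have hlen : s < xs.length := by
      have hl := congrArg List.length h
      simp at hl
      omega
    have hget : PySem.List.pyGetD xs (s : Int) 0 = y := by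
      rw [PySem.List.pyGetD_natCast]
      have h0 : (xs.drop s)[0]? = some y := by rw [h]; rfl
      rw [List.getElem?_drop] at h0
      have h0' : xs[s]? = some y := by simpa using h0
      simp [List.getD_eq_getElem?_getD, h0']
    have hdrop : xs.drop (s + 1) = ys := by
      have hd := congrArg (List.drop 1) h
      simpa [List.drop_drop, Nat.add_comm] using hd
    have hcons : PySem.List.pyRange (s : Int) (xs.length : Int) 1
        = (s : Int) :: PySem.List.pyRange ((s : Int) + 1) (xs.length : Int) 1 :=
      PySem.List.pyRange_one_cons (by exact_mod_cast hlen)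
    rw [hcons, PySem.List.enumerate_cons]
    simp only [List.foldl_cons]
    rw [hget]
    have hc1 : ((s : Int) + 1) = ((s + 1 : Nat) : Int) := by push_cast; ring
    rw [hc1]
    exact ih (s + 1) (f init (s : Int) y) hdrop

lemma body_eq (actual : List Int) (i g : Int) (hi : 0 ≤ i) (tv : Int × Int) :
    (match (buildA actual actual.length).get? g with
     | none => tv
     | some locs => locs.foldl (fun tv loc =>
         (if i = loc then tv.1 + 1 else tv.1,
          if i = loc - 1 ∨ i = loc + 1 then tv.2 + 1 else tv.2)) tv)
    = stepB actual tv i g := by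
  cases h : (buildA actual actual.length).get? g with
  | none =>
    have hempty : locsTo actual actual.length g = [] := by
      have hc := dict_char actual actual.length g
      rw [h] at hc
      by_cases he : locsTo actual actual.length g = []
      · exact he
      · rw [if_neg he] at hc; exact absurd hc (by simp)
    have hnot : ∀ c : Int, 0 ≤ c → c < (actual.length : Int) → PySem.List.pyGetD actual c 0 ≠ g := by
      intro c h0 h1 hEq
      have hm : c ∈ locsTo actual actual.length g := by
        simp [locsTo, List.mem_filter, PySem.List.mem_pyRange_one, h0, h1, hEq]
      rw [hempty] at hm
      simp at hm
    have c1 : ¬(i < (actual.length : Int) ∧ PySem.List.pyGetD actual i 0 = g) :=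
      fun ⟨ha, hb⟩ => hnot i hi ha hb
    have c3 : ¬(i + 1 < (actual.length : Int) ∧ PySem.List.pyGetD actual (i + 1) 0 = g) :=
      fun ⟨ha, hb⟩ => hnot (i + 1) (by omega) ha hb
    have c2' : ¬(1 ≤ i ∧ i ≤ (actual.length : Int) ∧ PySem.List.pyGetD actual (i - 1) 0 = g) :=
      fun ⟨ha, hb, hc'⟩ => hnot (i - 1) (by omega) (by omega) hc'
    simp [stepB, c1, c2', c3]
  | some locs =>
    have hc := dict_char actual actual.length g
    rw [h] at hc
    by_cases he : locsTo actual actual.length g = []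
    · rw [if_pos he] at hc; exact absurd hc (by simp)
    · rw [if_neg he] at hc
      have hlv : locs = locsTo actual actual.length g := Option.some.inj hc
      dsimp only
      rw [hlv, inner_fold, count_locs, count_locs, count_locs]
      simp only [stepB, Prod.mk.injEq]
      constructor <;> split_ifs <;> omega

lemma tv_eq (actual guess : List Int) :
    (PySem.List.pyRange 0 (guess.length : Int) 1).foldl (fun tv i =>
        match (buildA actual actual.length).get? (PySem.List.pyGetD guess i 0) with
        | none => tv
        | some locs => locs.foldl (fun tv loc =>
            (if i = loc then tv.1 + 1 else tv.1,
             if i = loc - 1 ∨ i = loc + 1 then tv.2 + 1 else tv.2)) tv) ((0 : Int), (0 : Int))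
    = (PySem.List.enumerate guess 0).foldl (fun tv p => stepB actual tv p.1 p.2) ((0 : Int), (0 : Int)) := by
  have h := foldl_range_enum (xs := guess)
      (f := fun tv i g =>
        match (buildA actual actual.length).get? g with
        | none => tv
        | some locs => locs.foldl (fun tv loc =>
            (if i = loc then tv.1 + 1 else tv.1,
             if i = loc - 1 ∨ i = loc + 1 then tv.2 + 1 else tv.2)) tv)
      guess 0 ((0 : Int), (0 : Int)) (by simp)
  rw [Nat.cast_zero] at h
  have hfst : ∀ p ∈ PySem.List.enumerate guess 0, (0 : Int) ≤ p.1 := by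
    intro p hp
    have hmap : p.1 ∈ List.map (fun x => x.1) (PySem.List.enumerate guess 0) :=
      List.mem_map_of_mem hp
    rw [PySem.List.map_fst_enumerate] at hmap
    exact (PySem.List.mem_pyRange_one.mp hmap).1
  exact h.trans (PySem.List.foldl_congr_mem _ _ _ _
    (fun acc p hp => body_eq actual p.1 p.2 (hfst p hp) acc))

-- ===== VERDICT (by name: the statement is the Claim_ definition above) =====
theorem getTV_spec : Claim_equal_getTV := by
  intro actual guess _
  show getTV actual guess = getTV_alt actual guess
  show (let tv : Int × Int :=
          (PySem.List.pyRange 0 (guess.length : Int) 1).foldl (fun tv i =>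
            match (buildA actual actual.length).get? (PySem.List.pyGetD guess i 0) with
            | none => tv
            | some locs => locs.foldl (fun tv loc =>
                (if i = loc then tv.1 + 1 else tv.1,
                 if i = loc - 1 ∨ i = loc + 1 then tv.2 + 1 else tv.2)) tv) ((0 : Int), (0 : Int));
        PySem.Int.toStr tv.1 ++ "T" ++ PySem.Int.toStr tv.2 ++ "V")
      = (let tv : Int × Int :=
          (PySem.List.enumerate guess 0).foldl (fun tv p => stepB actual tv p.1 p.2) ((0 : Int), (0 : Int));
        PySem.Int.toStr tv.1 ++ "T" ++ PySem.Int.toStr tv.2 ++ "V")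
  rw [tv_eq]
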